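-- pv_equiv track=rewrite | github.com/MrBrantCode/unitest_baseline | mut_generate/mist_train_taco/taco_2453/solution.py | minimum_teleportation_pipes
-- ===== SOURCE A (Python) =====
-- def minimum_teleportation_pipes(n, m, pairs):
--     n += 1
--     cluster = list(range(n))
--     dest = [0] * n
--     ab = [[] for _ in range(n)]
--
--     def root(x):
--         if x != cluster[x]:
--             cluster[x] = x = root(cluster[x])
--         return x
--
--     for a, b in pairs:
--         ab[a].append(b)
--         dest[b] += 1
--         cluster[root(a)] = root(b)
--
--     pool = [a for a, f in enumerate(dest) if not f]
--     for a in pool: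
--         for b in ab[a]:
--             dest[b] -= 1
--             if not dest[b]:
--                 pool.append(b)
--
--     ab = [True] * n
--     for a, f in enumerate(dest):
--         if f:
--             ab[root(a)] = False
--
--     return n - sum((f and a == c for a, c, f in zip(range(n), cluster, ab)))
-- ===== SOURCE B (Python) =====
-- def minimum_teleportation_pipes(n, m, pairs):
--     n += 1
--     cluster = list(range(n))
--
--     def root(x):
--         if x != cluster[x]:
--             cluster[x] = x = root(cluster[x])
--         return x
--
--     inb = [[] for _ in range(n)]
--     for a, b in pairs:
--         inb[b].append(a)
--         cluster[root(a)] = root(b)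
--
--     # peel by fixpoint iteration: repeatedly sweep all nodes, peeling any node
--     # whose every in-neighbour is already peeled, until a sweep changes nothing
--     peeled = [False] * n
--     changed = True
--     while changed:
--         changed = False
--         for v in range(n):
--             if not peeled[v] and all(peeled[a] for a in inb[v]):
--                 peeled[v] = True
--                 changed = True
--
--     good = [True] * n
--     for v in range(n):
--         if not peeled[v]:
--             good[root(v)] = False
--
--     return n - sum(1 for v in range(n) if v == cluster[v] and good[v])
-- ===== Notes on version B (the rewrite author's own statement) =====
-- stated objective: alternative
-- what changed: The Kahn-style worklist peel (in-degree counters plus a growing pool queue) is replaced by a Gauss-Seidel fixpoint iteration over an in-neighbour adjacency list: repeatedly sweep all nodes and peel any node whose every in-neighbour is already peeled, until a sweep changes nothing; the DSU grouping is kept identical and the final count is taken from the peeled flags instead of residual in-degrees.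
import Mathlib
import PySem

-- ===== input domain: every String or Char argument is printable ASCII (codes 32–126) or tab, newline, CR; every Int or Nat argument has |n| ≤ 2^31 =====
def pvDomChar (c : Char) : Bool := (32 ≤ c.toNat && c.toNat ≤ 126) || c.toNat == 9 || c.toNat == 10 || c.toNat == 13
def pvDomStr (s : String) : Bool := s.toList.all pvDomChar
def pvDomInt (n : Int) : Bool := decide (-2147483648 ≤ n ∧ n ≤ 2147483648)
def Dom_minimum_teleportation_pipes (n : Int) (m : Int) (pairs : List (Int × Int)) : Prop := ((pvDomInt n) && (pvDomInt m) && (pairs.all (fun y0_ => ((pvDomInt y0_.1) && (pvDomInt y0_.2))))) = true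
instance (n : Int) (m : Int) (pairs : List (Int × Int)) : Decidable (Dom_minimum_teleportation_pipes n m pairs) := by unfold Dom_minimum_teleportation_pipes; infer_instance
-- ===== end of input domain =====

-- B replaces A's Kahn worklist peel (in-degree counters + growing pool) by a fixpoint
-- iteration that repeatedly sweeps all nodes peeling those whose in-neighbours are all
-- peeled; DSU grouping is unchanged.  Objective: alternative algorithm, same results.


-- ===== PORT A =====

-- the recursive `root` with path compression; identical in A's and B's Python sources,
-- so both ports share it.  `cluster[x] = x = root(cluster[x])` assigns at the OLD index x.
-- fuel bounds the recursion depth (parent chains are shorter than the list, so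
-- `length + 1` fuel is never exhausted on a real run).
def pvRootGo (fuel : Nat) (cluster : List Int) (x : Int) : List Int × Int :=
  match fuel with
  | 0 => (cluster, x)
  | fuel + 1 =>
    if x ≠ PySem.List.pyGetD cluster x 0 then
      let r := pvRootGo fuel cluster (PySem.List.pyGetD cluster x 0)
      (PySem.List.pySetD r.1 x r.2, r.2)
    else (cluster, x)

def pvRoot (cluster : List Int) (x : Int) : List Int × Int :=
  pvRootGo (cluster.length + 1) cluster x

-- body of A's edge loop: ab[a].append(b); dest[b] += 1; cluster[root(a)] = root(b)
-- (Python evaluates the RHS root(b) before the target's root(a))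
def pvBuildA (st : List Int × List Int × List (List Int)) (p : Int × Int) :
    List Int × List Int × List (List Int) :=
  let ab := PySem.List.pySetD st.2.2 p.1 (PySem.List.pyGetD st.2.2 p.1 [] ++ [p.2])
  let dest := PySem.List.pySetD st.2.1 p.2 (PySem.List.pyGetD st.2.1 p.2 0 + 1)
  let rb := pvRoot st.1 p.2
  let ra := pvRoot rb.1 p.1
  (PySem.List.pySetD ra.1 ra.2 rb.2, dest, ab)

-- inner body of A's pool loop: dest[b] -= 1; if not dest[b]: pool.append(b)
def pvPeelStep (st : List Int × List Int) (b : Int) : List Int × List Int :=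
  let dest := PySem.List.pySetD st.1 b (PySem.List.pyGetD st.1 b 0 - 1)
  if PySem.List.pyGetD dest b 0 = 0 then (dest, st.2 ++ [b]) else (dest, st.2)

-- `for a in pool:` over the growing pool = an index walk; returns the final dest
def pvPeelA (ab : List (List Int)) : Nat → Nat → List Int → List Int → List Int
  | 0, _, _, dest => dest
  | fuel + 1, i, pool, dest =>
    match pool[i]? with
    | some a =>
      let st := (PySem.List.pyGetD ab a []).foldl pvPeelStep (dest, pool)
      pvPeelA ab fuel (i + 1) st.2 st.1
    | none => dest

-- body of A's marking loop: if f: ab[root(a)] = False  (over a, f in enumerate(dest))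
def pvMarkA (dest : List Int) (st : List Int × List Bool) (a : Int) : List Int × List Bool :=
  if PySem.List.pyGetD dest a 0 ≠ 0 then
    let r := pvRoot st.1 a
    (r.1, PySem.List.pySetD st.2 r.2 false)
  else st

def minimum_teleportation_pipes (n : Int) (m : Int) (pairs : List (Int × Int)) : Int :=
  let n := n + 1
  let cluster := PySem.List.pyRange 0 n 1
  let dest := List.replicate n.toNat (0 : Int)
  let ab := (PySem.List.pyRange 0 n 1).map (fun _ => ([] : List Int))
  let st := pairs.foldl pvBuildA (cluster, dest, ab)
  let pool := ((PySem.List.pyRange 0 n 1).filter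
      (fun a => PySem.List.pyGetD st.2.1 a 0 = 0))
  let destF := pvPeelA st.2.2 (st.2.1.length + pool.length + 1) 0 pool st.2.1
  let ab2 := List.replicate n.toNat true
  let mk := (PySem.List.pyRange 0 n 1).foldl (pvMarkA destF) (st.1, ab2)
  n - ((PySem.List.pyRange 0 n 1).zip (mk.1.zip mk.2)).foldl
      (fun acc t => acc + (if t.2.2 = true ∧ t.1 = t.2.1 then 1 else 0)) 0

-- ===== PORT B =====

-- body of B's edge loop: inb[b].append(a); cluster[root(a)] = root(b)
def pvBuildB (st : List Int × List (List Int)) (p : Int × Int) :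
    List Int × List (List Int) :=
  let inb := PySem.List.pySetD st.2 p.2 (PySem.List.pyGetD st.2 p.2 [] ++ [p.1])
  let rb := pvRoot st.1 p.2
  let ra := pvRoot rb.1 p.1
  (PySem.List.pySetD ra.1 ra.2 rb.2, inb)

-- body of B's sweep: if not peeled[v] and all(peeled[a] for a in inb[v]): peel v
def pvSweep (inb : List (List Int)) (st : List Bool × Bool) (v : Int) : List Bool × Bool :=
  if PySem.List.pyGetD st.1 v false = false ∧
      (PySem.List.pyGetD inb v []).all (fun a => PySem.List.pyGetD st.1 a false) then
    (PySem.List.pySetD st.1 v true, true)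
  else st

-- B's `while changed:` loop; each useful round peels at least one node, so
-- `length + 2` fuel is never exhausted
def pvLoopB (inb : List (List Int)) (rng : List Int) : Nat → List Bool → List Bool
  | 0, peeled => peeled
  | fuel + 1, peeled =>
    let st := rng.foldl (pvSweep inb) (peeled, false)
    if st.2 then pvLoopB inb rng fuel st.1 else st.1

-- body of B's marking loop: if not peeled[v]: good[root(v)] = False
def pvMarkB (peeled : List Bool) (st : List Int × List Bool) (v : Int) : List Int × List Bool :=
  if PySem.List.pyGetD peeled v false = false then
    let r := pvRoot st.1 v
    (r.1, PySem.List.pySetD st.2 r.2 false)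
  else st

def minimum_teleportation_pipes_alt (n : Int) (m : Int) (pairs : List (Int × Int)) : Int :=
  let n := n + 1
  let cluster := PySem.List.pyRange 0 n 1
  let inb := (PySem.List.pyRange 0 n 1).map (fun _ => ([] : List Int))
  let st := pairs.foldl pvBuildB (cluster, inb)
  let peeled := pvLoopB st.2 (PySem.List.pyRange 0 n 1) (st.2.length + 2)
      (List.replicate n.toNat false)
  let good := List.replicate n.toNat true
  let mk := (PySem.List.pyRange 0 n 1).foldl (pvMarkB peeled) (st.1, good)
  n - (PySem.List.pyRange 0 n 1).foldl
      (fun acc v => if v = PySem.List.pyGetD mk.1 v 0 ∧ PySem.List.pyGetD mk.2 v true = true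
        then acc + 1 else acc) 0

-- ===== PRECONDITION & SPEC =====
-- Pre_ excludes exactly the inputs on which A raises IndexError: a pair endpoint
-- outside Python's accepted index range [-(n+1), n] for the length-(n+1) arrays.
def Pre_minimum_teleportation_pipes (n : Int) (m : Int) (pairs : List (Int × Int)) : Prop :=
  ∀ p ∈ pairs, -(n + 1) ≤ p.1 ∧ p.1 ≤ n ∧ -(n + 1) ≤ p.2 ∧ p.2 ≤ n
instance (n : Int) (m : Int) (pairs : List (Int × Int)) : Decidable (Pre_minimum_teleportation_pipes n m pairs) := by unfold Pre_minimum_teleportation_pipes; infer_instance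

def pvWitness_minimum_teleportation_pipes : Int × Int × (List (Int × Int)) := (3, 2, [(1, 2), (2, 1)])

def Spec_minimum_teleportation_pipes (n : Int) (m : Int) (pairs : List (Int × Int)) (out : Int) : Prop := out = minimum_teleportation_pipes_alt n m pairs
instance (n : Int) (m : Int) (pairs : List (Int × Int)) (out : Int) : Decidable (Spec_minimum_teleportation_pipes n m pairs out) := by unfold Spec_minimum_teleportation_pipes; infer_instance

-- ===== CLAIM (what is proved, stated in full; the proofs are below) =====
def Claim_equal_minimum_teleportation_pipes : Prop := ∀ (n : Int) (m : Int) (pairs : List (Int × Int)), Dom_minimum_teleportation_pipes n m pairs → Pre_minimum_teleportation_pipes n m pairs → Spec_minimum_teleportation_pipes n m pairs (minimum_teleportation_pipes n m pairs)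

-- ===== LEMMAS AND PROOFS =====

-- ---------- index normalisation ----------

-- canonical cell index of Python index i into a length-N list (valid for -N ≤ i < N)
def pvCIdx (N : Nat) (i : Int) : Nat := if 0 ≤ i then i.toNat else N - (-i).toNat

lemma pvIdx_eq (N : Nat) (i : Int) (h1 : -(N:Int) ≤ i) (h2 : i < N) :
    PySem.List.pyIdx? N i = some (pvCIdx N i) := by
  simp only [PySem.List.pyIdx?, pvCIdx]
  split_ifs with ha hb <;> simp_all <;> omega

lemma pvCIdx_lt (N : Nat) (i : Int) (h1 : -(N:Int) ≤ i) (h2 : i < N) : pvCIdx N i < N := by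
  simp only [pvCIdx]; split_ifs <;> omega

lemma pvCIdx_natCast (N k : Nat) : pvCIdx N (k : Int) = k := by
  simp [pvCIdx]

lemma pvGetD_eq {α : Type} (xs : List α) (i : Int) (d : α) (N : Nat)
    (hl : xs.length = N) (h1 : -(N:Int) ≤ i) (h2 : i < N) :
    PySem.List.pyGetD xs i d = xs.getD (pvCIdx N i) d := by
  subst hl
  simp [PySem.List.pyGetD, PySem.List.pyGet?, pvIdx_eq _ _ h1 h2, List.getD]

lemma pvSetD_eq {α : Type} (xs : List α) (i : Int) (v : α) (N : Nat)
    (hl : xs.length = N) (h1 : -(N:Int) ≤ i) (h2 : i < N) :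
    PySem.List.pySetD xs i v = xs.set (pvCIdx N i) v := by
  subst hl
  simp [PySem.List.pySetD, PySem.List.pySet?, pvIdx_eq _ _ h1 h2]

lemma pvGetD_set_self {α : Type} (l : List α) (w : Nat) (x : α) (d : α) (hw : w < l.length) :
    (l.set w x).getD w d = x := by
  simp [List.getD, List.getElem?_set, hw]

lemma pvGetD_set_ne {α : Type} (l : List α) (w : Nat) (x : α) (d : α) (v : Nat) (h : v ≠ w) :
    (l.set w x).getD v d = l.getD v d := by
  simp [List.getD, List.getElem?_set, h.symm]

-- ---------- the model graph ----------

def pvInB (N : Nat) (p : Int × Int) : Prop :=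
  -(N:Int) ≤ p.1 ∧ p.1 < N ∧ -(N:Int) ≤ p.2 ∧ p.2 < N

def pvE (N : Nat) (pairs : List (Int × Int)) : List (Nat × Nat) :=
  pairs.map (fun p => (pvCIdx N p.1, pvCIdx N p.2))

def pvIndeg (E : List (Nat × Nat)) (v : Nat) : Nat := E.countP (fun e => decide (e.2 = v))

def pvInFrom (E : List (Nat × Nat)) (P : List Nat) (v : Nat) : Nat :=
  E.countP (fun e => decide (e.2 = v) && decide (e.1 ∈ P))

def pvOutMult (E : List (Nat × Nat)) (c v : Nat) : Nat :=
  E.countP (fun e => decide (e.1 = c) && decide (e.2 = v))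

def pvOutRaw (N : Nat) (pairs : List (Int × Int)) (c : Nat) : List Int :=
  (pairs.filter (fun p => decide (pvCIdx N p.1 = c))).map Prod.snd

def pvInRaw (N : Nat) (pairs : List (Int × Int)) (v : Nat) : List Int :=
  (pairs.filter (fun p => decide (pvCIdx N p.2 = v))).map Prod.fst

def pvDec (N : Nat) (done : List Int) (v : Nat) : Nat :=
  done.countP (fun t => decide (pvCIdx N t = v))

-- nodes all of whose (iterated) in-edges can be peeled: the nodes Kahn's algorithm removes
inductive pvPeelable (E : List (Nat × Nat)) : Nat → Prop
  | step (v : Nat) (h : ∀ s, (s, v) ∈ E → pvPeelable E s) : pvPeelable E v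

lemma pvE_bound (N : Nat) (pairs : List (Int × Int)) (hp : ∀ p ∈ pairs, pvInB N p) :
    ∀ e ∈ pvE N pairs, e.1 < N ∧ e.2 < N := by
  intro e he
  simp only [pvE, List.mem_map] at he
  obtain ⟨p, hpmem, rfl⟩ := he
  have := hp p hpmem
  exact ⟨pvCIdx_lt _ _ this.1 this.2.1, pvCIdx_lt _ _ this.2.2.1 this.2.2.2⟩

lemma pvMem_E_iff (N : Nat) (pairs : List (Int × Int)) (s v : Nat) :
    (s, v) ∈ pvE N pairs ↔ ∃ p ∈ pairs, pvCIdx N p.1 = s ∧ pvCIdx N p.2 = v := by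
  simp [pvE, List.mem_map, Prod.ext_iff]

lemma pvMem_inRaw_iff (N : Nat) (pairs : List (Int × Int)) (a : Int) (v : Nat) :
    a ∈ pvInRaw N pairs v ↔ ∃ p ∈ pairs, p.1 = a ∧ pvCIdx N p.2 = v := by
  simp [pvInRaw, List.mem_map, List.mem_filter]

lemma pvMem_outRaw (N : Nat) (pairs : List (Int × Int)) (c : Nat) (t : Int) :
    t ∈ pvOutRaw N pairs c → ∃ p ∈ pairs, p.2 = t := by
  simp only [pvOutRaw, List.mem_map, List.mem_filter]
  rintro ⟨p, ⟨hp, -⟩, rfl⟩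
  exact ⟨p, hp, rfl⟩

lemma pvInFrom_le (E : List (Nat × Nat)) (P : List Nat) (v : Nat) :
    pvInFrom E P v ≤ pvIndeg E v := by
  apply List.countP_mono_left
  intro e _ h
  simp only [Bool.and_eq_true] at h
  exact h.1

lemma pvInFrom_nil (E : List (Nat × Nat)) (v : Nat) : pvInFrom E [] v = 0 := by
  simp [pvInFrom]

lemma pvInFrom_append_single (E : List (Nat × Nat)) (P : List Nat) (c v : Nat) (hc : c ∉ P) :
    pvInFrom E (P ++ [c]) v = pvInFrom E P v + pvOutMult E c v := by
  induction E with
  | nil => simp [pvInFrom, pvOutMult]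
  | cons e E ih =>
    simp only [pvInFrom, pvOutMult, List.countP_cons] at *
    by_cases h2 : e.2 = v <;> by_cases hP : e.1 ∈ P <;> by_cases hc1 : e.1 = c <;>
      simp_all <;> omega

lemma pvInFrom_full_iff (E : List (Nat × Nat)) (P : List Nat) (v : Nat) :
    pvInFrom E P v = pvIndeg E v ↔ ∀ e ∈ E, e.2 = v → e.1 ∈ P := by
  induction E with
  | nil => simp [pvInFrom, pvIndeg]
  | cons e E ih =>
    have hle := pvInFrom_le E P v
    simp only [pvInFrom, pvIndeg, List.countP_cons, List.mem_cons] at hle ih ⊢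
    constructor
    · intro h x hx hxv
      rcases hx with rfl | hx
      · by_cases h1 : x.1 ∈ P
        · exact h1
        · exfalso; simp [hxv, h1] at h; omega
      · refine (ih.mp ?_) x hx hxv
        by_cases h2 : e.2 = v <;> by_cases h1 : e.1 ∈ P <;> simp [h2, h1] at h <;> omega
    · intro h
      have hE := ih.mpr (fun x hx => h x (Or.inr hx))
      by_cases h2 : e.2 = v
      · have h1 : e.1 ∈ P := h e (Or.inl rfl) h2
        simp [h2, h1, hE]
      · simp [h2, hE]

lemma pvDec_outRaw (N : Nat) (pairs : List (Int × Int)) (c v : Nat) :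
    pvDec N (pvOutRaw N pairs c) v = pvOutMult (pvE N pairs) c v := by
  induction pairs with
  | nil => simp [pvDec, pvOutRaw, pvE, pvOutMult]
  | cons p ps ih =>
    simp only [pvDec, pvOutRaw, pvE, pvOutMult, List.filter_cons, List.map_cons,
      List.countP_cons] at *
    by_cases h1 : pvCIdx N p.1 = c <;>
      by_cases h2 : pvCIdx N p.2 = v <;>
      simp [h1, h2, ih, List.countP_cons]

lemma pvDec_append_single (N : Nat) (done : List Int) (t : Int) (v : Nat) :
    pvDec N (done ++ [t]) v = pvDec N done v + (if pvCIdx N t = v then 1 else 0) := by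
  by_cases h : pvCIdx N t = v <;> simp [pvDec, List.countP_append, h]

lemma pvDec_prefix_le (N : Nat) (done ts : List Int) (v : Nat) :
    pvDec N done v ≤ pvDec N (done ++ ts) v := by
  simp [pvDec, List.countP_append]

-- ---------- lengths / cluster equality ----------

lemma pvLen_rootGo (f : Nat) (c : List Int) (x : Int) : (pvRootGo f c x).1.length = c.length := by
  induction f generalizing c x with
  | zero => simp [pvRootGo]
  | succ f ih =>
    simp only [pvRootGo]
    split
    · simp [PySem.List.length_pySetD, ih]
    · rfl

def pvClusterStep (c : List Int) (p : Int × Int) : List Int :=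
  let rb := pvRoot c p.2
  let ra := pvRoot rb.1 p.1
  PySem.List.pySetD ra.1 ra.2 rb.2

lemma pvLen_clusterStep (c : List Int) (p : Int × Int) :
    (pvClusterStep c p).length = c.length := by
  simp [pvClusterStep, pvRoot, PySem.List.length_pySetD, pvLen_rootGo]

lemma pvBuildA_fst (pairs : List (Int × Int)) (c d : List Int) (ab : List (List Int)) :
    (pairs.foldl pvBuildA (c, d, ab)).1 = pairs.foldl pvClusterStep c := by
  induction pairs generalizing c d ab with
  | nil => rfl
  | cons p ps ih => simpa [pvBuildA, pvClusterStep] using ih _ _ _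

lemma pvBuildB_fst (pairs : List (Int × Int)) (c : List Int) (inb : List (List Int)) :
    (pairs.foldl pvBuildB (c, inb)).1 = pairs.foldl pvClusterStep c := by
  induction pairs generalizing c inb with
  | nil => rfl
  | cons p ps ih => simpa [pvBuildB, pvClusterStep] using ih _ _

lemma pvLen_foldCluster (pairs : List (Int × Int)) (c : List Int) :
    (pairs.foldl pvClusterStep c).length = c.length := by
  induction pairs generalizing c with
  | nil => rfl
  | cons p ps ih => simp [ih, pvLen_clusterStep]

-- ---------- build-phase characterisation ----------

lemma pvBuildA_char (N : Nat) :
    ∀ (pairs : List (Int × Int)) (c d : List Int) (ab : List (List Int)),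
    (∀ p ∈ pairs, pvInB N p) → d.length = N → ab.length = N →
    (pairs.foldl pvBuildA (c, d, ab)).2.1.length = N ∧
    (pairs.foldl pvBuildA (c, d, ab)).2.2.length = N ∧
    (∀ v < N, (pairs.foldl pvBuildA (c, d, ab)).2.1.getD v 0
        = d.getD v 0 + (pvIndeg (pvE N pairs) v : Int)) ∧
    (∀ v < N, (pairs.foldl pvBuildA (c, d, ab)).2.2.getD v []
        = ab.getD v [] ++ pvOutRaw N pairs v) := by
  intro pairs
  induction pairs with
  | nil => intro c d ab hp hd habl; simp [pvE, pvIndeg, pvOutRaw, hd, habl]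
  | cons p ps ih =>
    intro c d ab hp hd habl
    obtain ⟨h1, h2, h3, h4⟩ := hp p (List.mem_cons_self ..)
    have hps : ∀ q ∈ ps, pvInB N q := fun q hq => hp q (List.mem_cons_of_mem _ hq)
    have hw1 := pvCIdx_lt N p.1 h1 h2
    have hw2 := pvCIdx_lt N p.2 h3 h4
    simp only [List.foldl_cons, pvBuildA]
    rw [pvSetD_eq d p.2 _ N hd h3 h4, pvGetD_eq d p.2 _ N hd h3 h4,
      pvSetD_eq ab p.1 _ N habl h1 h2, pvGetD_eq ab p.1 _ N habl h1 h2]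
    have hd' : (d.set (pvCIdx N p.2) (d.getD (pvCIdx N p.2) 0 + 1)).length = N := by
      simp [hd]
    have habl' : (ab.set (pvCIdx N p.1) (ab.getD (pvCIdx N p.1) [] ++ [p.2])).length = N := by
      simp [habl]
    obtain ⟨L1, L2, HD, HAB⟩ := ih _ _ _ hps hd' habl'
    refine ⟨L1, L2, ?_, ?_⟩
    · intro v hv
      rw [HD v hv]
      have hind : pvIndeg (pvE N (p :: ps)) v
          = (if pvCIdx N p.2 = v then 1 else 0) + pvIndeg (pvE N ps) v := by
        simp only [pvE, pvIndeg, List.map_cons, List.countP_cons]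
        by_cases h : pvCIdx N p.2 = v <;> simp [h] <;> omega
      rw [hind]
      by_cases h : v = pvCIdx N p.2
      · rw [h, pvGetD_set_self d (pvCIdx N p.2) _ 0 (by omega)]
        simp [← h]
        omega
      · rw [pvGetD_set_ne d _ _ 0 v h]
        simp [Ne.symm h]
    · intro v hv
      rw [HAB v hv]
      have hout : pvOutRaw N (p :: ps) v
          = (if pvCIdx N p.1 = v then [p.2] else []) ++ pvOutRaw N ps v := by
        simp only [pvOutRaw, List.filter_cons]
        by_cases h : pvCIdx N p.1 = v <;> simp [h]
      rw [hout]
      by_cases h : v = pvCIdx N p.1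
      · rw [h, pvGetD_set_self ab (pvCIdx N p.1) _ [] (by omega)]
        simp [← h]
      · rw [pvGetD_set_ne ab _ _ [] v h]
        simp [Ne.symm h]

lemma pvBuildB_char (N : Nat) :
    ∀ (pairs : List (Int × Int)) (c : List Int) (inb : List (List Int)),
    (∀ p ∈ pairs, pvInB N p) → inb.length = N →
    (pairs.foldl pvBuildB (c, inb)).2.length = N ∧
    (∀ v < N, (pairs.foldl pvBuildB (c, inb)).2.getD v []
        = inb.getD v [] ++ pvInRaw N pairs v) := by
  intro pairs
  induction pairs with
  | nil => intro c inb hp hil; simp [pvInRaw, hil]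
  | cons p ps ih =>
    intro c inb hp hil
    obtain ⟨h1, h2, h3, h4⟩ := hp p (List.mem_cons_self ..)
    have hps : ∀ q ∈ ps, pvInB N q := fun q hq => hp q (List.mem_cons_of_mem _ hq)
    have hw2 := pvCIdx_lt N p.2 h3 h4
    simp only [List.foldl_cons, pvBuildB]
    rw [pvSetD_eq inb p.2 _ N hil h3 h4, pvGetD_eq inb p.2 _ N hil h3 h4]
    have hil' : (inb.set (pvCIdx N p.2) (inb.getD (pvCIdx N p.2) [] ++ [p.1])).length = N := by
      simp [hil]
    obtain ⟨L1, HI⟩ := ih _ _ hps hil'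
    refine ⟨L1, ?_⟩
    intro v hv
    rw [HI v hv]
    have hin : pvInRaw N (p :: ps) v
        = (if pvCIdx N p.2 = v then [p.1] else []) ++ pvInRaw N ps v := by
      simp only [pvInRaw, List.filter_cons]
      by_cases h : pvCIdx N p.2 = v <;> simp [h]
    rw [hin]
    by_cases h : v = pvCIdx N p.2
    · rw [h, pvGetD_set_self inb (pvCIdx N p.2) _ [] (by omega)]
      simp [← h]
    · rw [pvGetD_set_ne inb _ _ [] v h]
      simp [Ne.symm h]

-- ---------- A's worklist peel computes the peelable set ----------

lemma pvNodup_length_le (N : Nat) (l : List Nat) (h : l.Nodup) (hb : ∀ x ∈ l, x < N) :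
    l.length ≤ N := by
  have h1 : l.toFinset.card = l.length := List.toFinset_card_of_nodup h
  have h2 : l.toFinset ⊆ Finset.range N := by
    intro x hx
    simp only [List.mem_toFinset] at hx
    simp [hb x hx]
  have := Finset.card_le_card h2
  simp_all

lemma pvNotMemTake {α : Type} [DecidableEq α] (l : List α) (h : l.Nodup) (i : Nat)
    (hi : i < l.length) : l[i] ∉ l.take i := by
  intro hmem
  obtain ⟨j, hj, hje⟩ := List.getElem_of_mem hmem
  rw [List.getElem_take] at hje
  have hjl : j < l.length := lt_of_lt_of_le (lt_of_lt_of_le hj (by simp [List.length_take])) le_rfl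
  have := (List.Nodup.getElem_inj_iff h).mp hje
  have hji : j < i := by
    have := hj
    simp [List.length_take] at this
    omega
  omega

lemma pvPeel_inner (N : Nat) (pairs : List (Int × Int)) (hp : ∀ p ∈ pairs, pvInB N p)
    (c : Nat) (P : List Nat) (hcP : c ∉ P) (pool : List Int) :
    ∀ (ts done : List Int) (dest pl : List Int),
    pvOutRaw N pairs c = done ++ ts →
    dest.length = N →
    (∀ x ∈ pl, -(N:Int) ≤ x ∧ x < N) →
    (pl.map (pvCIdx N)).Nodup →
    pool <+: pl →
    (∀ v < N, dest.getD v 0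
        = (pvIndeg (pvE N pairs) v : Int) - pvInFrom (pvE N pairs) P v - pvDec N done v) →
    (∀ v < N, (v ∈ pl.map (pvCIdx N)
        ↔ pvInFrom (pvE N pairs) P v + pvDec N done v = pvIndeg (pvE N pairs) v)) →
    (ts.foldl pvPeelStep (dest, pl)).1.length = N ∧
    (∀ x ∈ (ts.foldl pvPeelStep (dest, pl)).2, -(N:Int) ≤ x ∧ x < N) ∧
    ((ts.foldl pvPeelStep (dest, pl)).2.map (pvCIdx N)).Nodup ∧
    pool <+: (ts.foldl pvPeelStep (dest, pl)).2 ∧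
    (∀ v < N, (ts.foldl pvPeelStep (dest, pl)).1.getD v 0
        = (pvIndeg (pvE N pairs) v : Int) - pvInFrom (pvE N pairs) P v
          - pvDec N (done ++ ts) v) ∧
    (∀ v < N, (v ∈ (ts.foldl pvPeelStep (dest, pl)).2.map (pvCIdx N)
        ↔ pvInFrom (pvE N pairs) P v + pvDec N (done ++ ts) v = pvIndeg (pvE N pairs) v)) := by
  intro ts
  induction ts with
  | nil =>
    intro done dest pl hout hdl hbnd hnd hpre he hf
    simp only [List.foldl_nil, List.append_nil]
    exact ⟨hdl, hbnd, hnd, hpre, he, hf⟩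
  | cons t ts ih =>
    intro done dest pl hout hdl hbnd hnd hpre he hf
    have htmem : t ∈ pvOutRaw N pairs c := by
      rw [hout]; exact List.mem_append_right _ (List.mem_cons_self ..)
    obtain ⟨pr, hpr, hpr2⟩ := pvMem_outRaw N pairs c t htmem
    obtain ⟨_, _, hb3, hb4⟩ := hp pr hpr
    rw [hpr2] at hb3 hb4
    have hw := pvCIdx_lt N t hb3 hb4
    simp only [List.foldl_cons, pvPeelStep]
    rw [pvGetD_eq dest t 0 N hdl hb3 hb4, pvSetD_eq dest t _ N hdl hb3 hb4]
    have hdl1 : (dest.set (pvCIdx N t) (dest.getD (pvCIdx N t) 0 - 1)).length = N := by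
      simp [hdl]
    have hget1 : (dest.set (pvCIdx N t) (dest.getD (pvCIdx N t) 0 - 1)).getD (pvCIdx N t) 0
        = dest.getD (pvCIdx N t) 0 - 1 := pvGetD_set_self _ _ _ _ (by omega)
    rw [pvGetD_eq _ t 0 N hdl1 hb3 hb4, hget1]
    have hreq : pvOutRaw N pairs c = (done ++ [t]) ++ ts := by rw [hout]; simp
    have hbound : pvInFrom (pvE N pairs) P (pvCIdx N t) + pvDec N done (pvCIdx N t) + 1
        ≤ pvIndeg (pvE N pairs) (pvCIdx N t) := by
      have h1 : pvDec N (done ++ [t]) (pvCIdx N t) ≤ pvDec N (pvOutRaw N pairs c) (pvCIdx N t) := by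
        rw [hreq]
        exact pvDec_prefix_le N (done ++ [t]) ts _
      rw [pvDec_append_single, if_pos rfl] at h1
      have h2 := pvDec_outRaw N pairs c (pvCIdx N t)
      have h3 := pvInFrom_append_single (pvE N pairs) P c (pvCIdx N t) hcP
      have h4 := pvInFrom_le (pvE N pairs) (P ++ [c]) (pvCIdx N t)
      omega
    have hwnot : pvCIdx N t ∉ pl.map (pvCIdx N) := by
      intro hin
      have := (hf _ hw).mp hin
      omega
    have hev := he _ hw
    have henew : ∀ v < N, (dest.set (pvCIdx N t) (dest.getD (pvCIdx N t) 0 - 1)).getD v 0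
        = (pvIndeg (pvE N pairs) v : Int) - pvInFrom (pvE N pairs) P v
          - pvDec N (done ++ [t]) v := by
      intro v hv
      rw [pvDec_append_single]
      by_cases hvw : v = pvCIdx N t
      · rw [hvw, hget1, if_pos rfl, hev]
        push_cast
        ring
      · rw [pvGetD_set_ne _ _ _ _ _ hvw, he _ hv, if_neg (fun hh => hvw hh.symm)]
        simp
    split
    · rename_i hzero
      have hbnd1 : ∀ x ∈ pl ++ [t], -(N:Int) ≤ x ∧ x < N := by
        intro x hx
        rcases List.mem_append.mp hx with hx | hx
        · exact hbnd x hx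
        · rw [List.mem_singleton.mp hx]
          exact ⟨hb3, hb4⟩
      have hnd1 : ((pl ++ [t]).map (pvCIdx N)).Nodup := by
        rw [List.map_append, List.nodup_append]
        refine ⟨hnd, by simp, ?_⟩
        intro x hx y hy hxy
        have hy3 : y = pvCIdx N t := by simpa using hy
        apply hwnot
        rw [← hy3, ← hxy]
        exact hx
      have hpre1 : pool <+: pl ++ [t] := hpre.trans (List.prefix_append pl [t])
      have hf1 : ∀ v < N, (v ∈ (pl ++ [t]).map (pvCIdx N)
          ↔ pvInFrom (pvE N pairs) P v + pvDec N (done ++ [t]) v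
            = pvIndeg (pvE N pairs) v) := by
        intro v hv
        rw [List.map_append, List.mem_append, pvDec_append_single]
        by_cases hvw : v = pvCIdx N t
        · rw [hvw, if_pos rfl]
          constructor
          · intro _; omega
          · intro _; simp
        · rw [if_neg (fun hh => hvw hh.symm)]
          simpa [hvw] using hf _ hv
      have hres := ih (done ++ [t]) _ _ hreq hdl1 hbnd1 hnd1 hpre1 henew hf1
      simpa [List.append_assoc] using hres
    · rename_i hzero
      have hf1 : ∀ v < N, (v ∈ pl.map (pvCIdx N)
          ↔ pvInFrom (pvE N pairs) P v + pvDec N (done ++ [t]) v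
            = pvIndeg (pvE N pairs) v) := by
        intro v hv
        rw [pvDec_append_single]
        by_cases hvw : v = pvCIdx N t
        · rw [hvw, if_pos rfl]
          constructor
          · intro hin; exact absurd hin hwnot
          · intro heq; exfalso; omega
        · rw [if_neg (fun hh => hvw hh.symm)]
          simpa using hf _ hv
      have hres := ih (done ++ [t]) _ _ hreq hdl1 hbnd hnd hpre henew hf1
      simpa [List.append_assoc] using hres

lemma pvPeelA_main (N : Nat) (pairs : List (Int × Int)) (hp : ∀ p ∈ pairs, pvInB N p)
    (abF : List (List Int)) (habl : abF.length = N)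
    (hab : ∀ v < N, abF.getD v [] = pvOutRaw N pairs v) :
    ∀ (fuel i : Nat) (pool dest : List Int),
    dest.length = N →
    (∀ x ∈ pool, -(N:Int) ≤ x ∧ x < N) →
    (pool.map (pvCIdx N)).Nodup →
    i ≤ pool.length →
    (∀ v < N, dest.getD v 0
        = (pvIndeg (pvE N pairs) v : Int)
          - pvInFrom (pvE N pairs) ((pool.take i).map (pvCIdx N)) v) →
    (∀ v < N, (v ∈ pool.map (pvCIdx N)
        ↔ pvInFrom (pvE N pairs) ((pool.take i).map (pvCIdx N)) v = pvIndeg (pvE N pairs) v)) →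
    (∀ v ∈ (pool.take i).map (pvCIdx N), pvPeelable (pvE N pairs) v) →
    N + 1 ≤ fuel + i →
    ∃ P : List Nat,
      (pvPeelA abF fuel i pool dest).length = N ∧
      (∀ v < N, (pvPeelA abF fuel i pool dest).getD v 0
          = (pvIndeg (pvE N pairs) v : Int) - pvInFrom (pvE N pairs) P v) ∧
      (∀ v < N, (v ∈ P ↔ pvInFrom (pvE N pairs) P v = pvIndeg (pvE N pairs) v)) ∧
      (∀ v ∈ P, pvPeelable (pvE N pairs) v) := by
  intro fuel
  induction fuel with
  | zero =>
    intro i pool dest hdl hbnd hnd hile he hf hsup hfuel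
    exfalso
    have hlen : (pool.map (pvCIdx N)).length ≤ N := by
      apply pvNodup_length_le N _ hnd
      intro x hx
      obtain ⟨y, hy, rfl⟩ := List.mem_map.mp hx
      exact pvCIdx_lt N y (hbnd y hy).1 (hbnd y hy).2
    simp only [List.length_map] at hlen
    omega
  | succ fuel ih =>
    intro i pool dest hdl hbnd hnd hile he hf hsup hfuel
    simp only [pvPeelA]
    cases hpi : pool[i]? with
    | none =>
      simp only [hpi]
      have hieq : i = pool.length := by
        have := List.getElem?_eq_none_iff.mp hpi
        omega
      refine ⟨pool.map (pvCIdx N), hdl, ?_, ?_, ?_⟩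
      · intro v hv
        have := he v hv
        rwa [hieq, List.take_length] at this
      · intro v hv
        have := hf v hv
        rwa [hieq, List.take_length] at this
      · intro v hv
        apply hsup
        rwa [hieq, List.take_length]
    | some a =>
      simp only [hpi]
      obtain ⟨hilt, hae⟩ := List.getElem?_eq_some_iff.mp hpi
      have hamem : a ∈ pool := List.mem_of_getElem? hpi
      obtain ⟨ha1, ha2⟩ := hbnd a hamem
      have hc := pvCIdx_lt N a ha1 ha2
      -- c := pvCIdx N a is not in the processed prefix
      have hcP : pvCIdx N a ∉ (pool.take i).map (pvCIdx N) := by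
        rw [List.map_take]
        have hlt' : i < (pool.map (pvCIdx N)).length := by simpa using hilt
        have hnm := pvNotMemTake _ hnd i hlt'
        rw [List.getElem_map] at hnm
        rw [hae] at hnm
        exact hnm
      -- the adjacency row is the raw out-list of c
      have hrow : PySem.List.pyGetD abF a [] = pvOutRaw N pairs (pvCIdx N a) := by
        rw [pvGetD_eq abF a [] N habl ha1 ha2]
        exact hab _ hc
      rw [hrow]
      have hdec0 : ∀ v, pvDec N [] v = 0 := by intro v; simp [pvDec]
      have he' : ∀ v < N, dest.getD v 0
          = (pvIndeg (pvE N pairs) v : Int)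
            - pvInFrom (pvE N pairs) ((pool.take i).map (pvCIdx N)) v - pvDec N [] v := by
        intro v hv
        rw [hdec0]
        simpa using he v hv
      have hf' : ∀ v < N, (v ∈ pool.map (pvCIdx N)
          ↔ pvInFrom (pvE N pairs) ((pool.take i).map (pvCIdx N)) v + pvDec N [] v
            = pvIndeg (pvE N pairs) v) := by
        intro v hv
        rw [hdec0]
        simpa using hf v hv
      obtain ⟨L1, B1, D1, R1, E1, F1⟩ :=
        pvPeel_inner N pairs hp (pvCIdx N a) ((pool.take i).map (pvCIdx N)) hcP pool
          (pvOutRaw N pairs (pvCIdx N a)) [] dest pool (by simp) hdl hbnd hnd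
          (List.prefix_refl pool) he' hf'
      set st := (pvOutRaw N pairs (pvCIdx N a)).foldl pvPeelStep (dest, pool) with hst
      -- the processed prefix after this step
      have htake : st.2.take (i + 1) = pool.take i ++ [a] := by
        obtain ⟨rest, hrest⟩ := R1
        rw [← hrest, List.take_append_of_le_length (by omega), List.take_succ, hpi]
        rfl
      have hP1 : (st.2.take (i + 1)).map (pvCIdx N)
          = (pool.take i).map (pvCIdx N) ++ [pvCIdx N a] := by
        rw [htake, List.map_append]
        rfl
      have hIF : ∀ v, pvInFrom (pvE N pairs) ((st.2.take (i + 1)).map (pvCIdx N)) v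
          = pvInFrom (pvE N pairs) ((pool.take i).map (pvCIdx N)) v
            + pvOutMult (pvE N pairs) (pvCIdx N a) v := by
        intro v
        rw [hP1]
        exact pvInFrom_append_single _ _ _ _ hcP
      -- c itself is peelable
      have hcPeel : pvPeelable (pvE N pairs) (pvCIdx N a) := by
        have hcm : pvCIdx N a ∈ pool.map (pvCIdx N) := List.mem_map_of_mem hamem
        have hfull := (hf _ hc).mp hcm
        have hsrc := (pvInFrom_full_iff _ _ _).mp hfull
        refine pvPeelable.step _ (fun sAny hsE => ?_)
        have := hsrc _ hsE rfl
        exact hsup _ this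
      refine ih (i + 1) st.2 st.1 L1 B1 D1 ?_ ?_ ?_ ?_ (by omega)
      · obtain ⟨rest, hrest⟩ := R1
        rw [← hrest]
        simp
        omega
      · intro v hv
        rw [E1 v hv, List.nil_append, hIF v, pvDec_outRaw]
        push_cast
        ring
      · intro v hv
        rw [F1 v hv, List.nil_append, hIF v, pvDec_outRaw]
      · intro v hv
        rw [hP1] at hv
        rcases List.mem_append.mp hv with hv | hv
        · exact hsup v hv
        · rw [List.mem_singleton.mp hv]
          exact hcPeel

-- a fixpoint P supported by peelable elements characterises destF = 0 as pvPeelable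
lemma pvPeelA_iff (N : Nat) (pairs : List (Int × Int)) (hp : ∀ p ∈ pairs, pvInB N p)
    (P : List Nat)
    (hfix : ∀ v < N, (v ∈ P ↔ pvInFrom (pvE N pairs) P v = pvIndeg (pvE N pairs) v))
    (hsup : ∀ v ∈ P, pvPeelable (pvE N pairs) v) :
    ∀ v < N, (v ∈ P ↔ pvPeelable (pvE N pairs) v) := by
  intro v hv
  constructor
  · exact hsup v
  · intro hPeel
    induction hPeel with
    | step w hw ihw =>
      refine (hfix w ?_).mpr ?_
      · exact hv
      · rw [pvInFrom_full_iff]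
        intro e he h2
        have hb := (pvE_bound N pairs hp e he).1
        have hEw : (e.1, w) ∈ pvE N pairs := by
          have heta : e = (e.1, e.2) := rfl
          rw [heta, h2] at he
          exact he
        exact ihw e.1 hEw hb

-- ---------- B's sweep loop computes the peelable set ----------

def pvSound (N : Nat) (pairs : List (Int × Int)) (p : List Bool) : Prop :=
  ∀ v < N, p.getD v false = true → pvPeelable (pvE N pairs) v

def pvCntT (p : List Bool) : Nat := p.countP id

lemma pvCount_set_true (p : List Bool) (w : Nat) (hw : w < p.length)
    (hf : p.getD w false = false) : pvCntT (p.set w true) = pvCntT p + 1 := by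
  induction p generalizing w with
  | nil => simp at hw
  | cons x xs ih =>
    cases w with
    | zero =>
      simp only [List.getD, List.getElem?_cons_zero, Option.getD_some] at hf
      simp [pvCntT, List.countP_cons, hf]
    | succ w =>
      have hw' : w < xs.length := by simpa using hw
      have hf' : xs.getD w false = false := by
        simpa [List.getD] using hf
      have := ih _ hw' hf'
      simp only [List.set_cons_succ, pvCntT, List.countP_cons] at this ⊢
      omega

lemma pvCntT_le_len (p : List Bool) : pvCntT p ≤ p.length := by
  exact List.countP_le_length

lemma pvSweep_flag_true (inb : List (List Int)) (vs : List Int) (p : List Bool) :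
    (vs.foldl (pvSweep inb) (p, true)).2 = true := by
  induction vs generalizing p with
  | nil => rfl
  | cons v vs ih =>
    simp only [List.foldl_cons, pvSweep]
    split
    · exact ih _
    · exact ih _

lemma pvSweep_props (N : Nat) (pairs : List (Int × Int)) (hp : ∀ p ∈ pairs, pvInB N p)
    (inbF : List (List Int)) (hil : inbF.length = N)
    (hinb : ∀ v < N, inbF.getD v [] = pvInRaw N pairs v) :
    ∀ (vs : List Int) (p : List Bool) (ch : Bool),
    (∀ v ∈ vs, 0 ≤ v ∧ v < (N:Int)) →
    p.length = N → pvSound N pairs p →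
    (vs.foldl (pvSweep inbF) (p, ch)).1.length = N ∧
    pvSound N pairs (vs.foldl (pvSweep inbF) (p, ch)).1 ∧
    (∀ v < N, p.getD v false = true → (vs.foldl (pvSweep inbF) (p, ch)).1.getD v false = true) ∧
    pvCntT p ≤ pvCntT (vs.foldl (pvSweep inbF) (p, ch)).1 := by
  intro vs
  induction vs with
  | nil => intro p ch hvs hl hs; exact ⟨hl, hs, fun v _ ht => ht, le_rfl⟩
  | cons v vs ih =>
    intro p ch hvs hl hs
    obtain ⟨hv0, hvN⟩ := hvs v (List.mem_cons_self ..)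
    have hvs' : ∀ x ∈ vs, 0 ≤ x ∧ x < (N:Int) := fun x hx => hvs x (List.mem_cons_of_mem _ hx)
    have hbl : -(N:Int) ≤ v := by omega
    have hcv := pvCIdx_lt N v hbl hvN
    simp only [List.foldl_cons, pvSweep]
    split
    · rename_i hg
      obtain ⟨hgf, hgall⟩ := hg
      rw [pvSetD_eq p v true N hl hbl hvN]
      have hl' : (p.set (pvCIdx N v) true).length = N := by simp [hl]
      have hfalse : p.getD (pvCIdx N v) false = false := by
        rw [pvGetD_eq p v false N hl hbl hvN] at hgf; exact hgf
      have hPeel : pvPeelable (pvE N pairs) (pvCIdx N v) := by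
        refine pvPeelable.step _ (fun sAny hsE => ?_)
        obtain ⟨pr, hpr, hpr1, hpr2⟩ := (pvMem_E_iff N pairs sAny (pvCIdx N v)).mp hsE
        have hmem : pr.1 ∈ pvInRaw N pairs (pvCIdx N v) :=
          (pvMem_inRaw_iff N pairs pr.1 (pvCIdx N v)).mpr ⟨pr, hpr, rfl, hpr2⟩
        have hall := hgall
        rw [pvGetD_eq inbF v [] N hil hbl hvN, hinb _ hcv] at hall
        have htrue := (List.all_eq_true.mp hall) pr.1 hmem
        obtain ⟨hb1, hb2, _, _⟩ := hp pr hpr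
        rw [pvGetD_eq p pr.1 false N hl hb1 hb2] at htrue
        have hPa := hs (pvCIdx N pr.1) (pvCIdx_lt N pr.1 hb1 hb2) htrue
        rw [← hpr1]; exact hPa
      have hs' : pvSound N pairs (p.set (pvCIdx N v) true) := by
        intro w hw ht
        by_cases hwv : w = pvCIdx N v
        · rw [hwv]; exact hPeel
        · rw [pvGetD_set_ne p _ _ false w hwv] at ht; exact hs w hw ht
      obtain ⟨L, S, M, C⟩ := ih _ true hvs' hl' hs'
      refine ⟨L, S, ?_, ?_⟩
      · intro w hw ht
        apply M w hw
        by_cases hwv : w = pvCIdx N v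
        · rw [hwv, pvGetD_set_self p _ _ false (by omega)]
        · rw [pvGetD_set_ne p _ _ false w hwv]; exact ht
      · refine le_trans ?_ C
        rw [pvCount_set_true p _ (by omega) hfalse]
        omega
    · exact ih _ ch hvs' hl hs

lemma pvSweep_cnt_mono (N : Nat) (inbF : List (List Int)) (hil : inbF.length = N) :
    ∀ (vs : List Int) (p : List Bool) (ch : Bool),
    (∀ v ∈ vs, 0 ≤ v ∧ v < (N:Int)) → p.length = N →
    pvCntT p ≤ pvCntT (vs.foldl (pvSweep inbF) (p, ch)).1 ∧
    (vs.foldl (pvSweep inbF) (p, ch)).1.length = N := by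
  intro vs
  induction vs with
  | nil => intro p ch hvs hl; exact ⟨le_rfl, hl⟩
  | cons v vs ih =>
    intro p ch hvs hl
    obtain ⟨hv0, hvN⟩ := hvs v (List.mem_cons_self ..)
    have hvs' : ∀ x ∈ vs, 0 ≤ x ∧ x < (N:Int) := fun x hx => hvs x (List.mem_cons_of_mem _ hx)
    have hbl : -(N:Int) ≤ v := by omega
    have hcv := pvCIdx_lt N v hbl hvN
    simp only [List.foldl_cons, pvSweep]
    split
    · rename_i hg
      rw [pvSetD_eq p v true N hl hbl hvN]
      have hfalse : p.getD (pvCIdx N v) false = false := by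
        rw [pvGetD_eq p v false N hl hbl hvN] at hg; exact hg.1
      have hl' : (p.set (pvCIdx N v) true).length = N := by simp [hl]
      obtain ⟨C, L⟩ := ih _ true hvs' hl'
      refine ⟨le_trans ?_ C, L⟩
      rw [pvCount_set_true p _ (by omega) hfalse]
      omega
    · exact ih _ ch hvs' hl

lemma pvSweep_false (N : Nat) (inbF : List (List Int)) :
    ∀ (vs : List Int) (p : List Bool),
    (vs.foldl (pvSweep inbF) (p, false)).2 = false →
    (vs.foldl (pvSweep inbF) (p, false)).1 = p ∧
    (∀ v ∈ vs, ¬ (PySem.List.pyGetD p v false = false ∧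
        (PySem.List.pyGetD inbF v []).all (fun a => PySem.List.pyGetD p a false))) := by
  intro vs
  induction vs with
  | nil => intro p _; exact ⟨rfl, by simp⟩
  | cons v vs ih =>
    intro p hfl
    simp only [List.foldl_cons, pvSweep] at hfl ⊢
    by_cases hg : PySem.List.pyGetD p v false = false ∧
        ((PySem.List.pyGetD inbF v []).all (fun a => PySem.List.pyGetD p a false) = true)
    · exfalso
      rw [if_pos hg] at hfl
      rw [pvSweep_flag_true inbF vs _] at hfl
      simp at hfl
    · rw [if_neg hg] at hfl ⊢
      obtain ⟨h1, h2⟩ := ih p hfl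
      refine ⟨h1, ?_⟩
      intro x hx
      rcases List.mem_cons.mp hx with rfl | hx
      · exact hg
      · exact h2 x hx

lemma pvSweep_true_cnt (N : Nat) (inbF : List (List Int)) (hil : inbF.length = N) :
    ∀ (vs : List Int) (p : List Bool),
    (∀ v ∈ vs, 0 ≤ v ∧ v < (N:Int)) → p.length = N →
    (vs.foldl (pvSweep inbF) (p, false)).2 = true →
    pvCntT p + 1 ≤ pvCntT (vs.foldl (pvSweep inbF) (p, false)).1 ∧
    (vs.foldl (pvSweep inbF) (p, false)).1.length = N := by
  intro vs
  induction vs with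
  | nil => intro p _ _ h; exact absurd h (by simp)
  | cons v vs ih =>
    intro p hvs hl hfl
    obtain ⟨hv0, hvN⟩ := hvs v (List.mem_cons_self ..)
    have hvs' : ∀ x ∈ vs, 0 ≤ x ∧ x < (N:Int) := fun x hx => hvs x (List.mem_cons_of_mem _ hx)
    have hbl : -(N:Int) ≤ v := by omega
    have hcv := pvCIdx_lt N v hbl hvN
    simp only [List.foldl_cons, pvSweep] at hfl ⊢
    split
    · rename_i hg
      rw [pvSetD_eq p v true N hl hbl hvN]
      have hfalse : p.getD (pvCIdx N v) false = false := by
        rw [pvGetD_eq p v false N hl hbl hvN] at hg; exact hg.1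
      have hl' : (p.set (pvCIdx N v) true).length = N := by simp [hl]
      obtain ⟨C, L⟩ := pvSweep_cnt_mono N inbF hil vs _ true hvs' hl'
      refine ⟨?_, L⟩
      refine le_trans ?_ C
      rw [pvCount_set_true p _ (by omega) hfalse]
    · rename_i hg
      rw [if_neg hg] at hfl
      exact ih p hvs' hl hfl

lemma pvLoopB_main (N : Nat) (pairs : List (Int × Int)) (hp : ∀ p ∈ pairs, pvInB N p)
    (inbF : List (List Int)) (hil : inbF.length = N)
    (hinb : ∀ v < N, inbF.getD v [] = pvInRaw N pairs v) :
    ∀ (fuel : Nat) (p : List Bool),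
    p.length = N → pvSound N pairs p → N + 1 ≤ fuel + pvCntT p →
    (pvLoopB inbF (PySem.List.pyRange 0 (N:Int) 1) fuel p).length = N ∧
    pvSound N pairs (pvLoopB inbF (PySem.List.pyRange 0 (N:Int) 1) fuel p) ∧
    (∀ v < N, pvPeelable (pvE N pairs) v →
      (pvLoopB inbF (PySem.List.pyRange 0 (N:Int) 1) fuel p).getD v false = true) := by
  intro fuel
  induction fuel with
  | zero =>
    intro p hl hs hfuel
    exfalso
    have := pvCntT_le_len p
    omega
  | succ fuel ih =>
    intro p hl hs hfuel
    have hrng : ∀ v ∈ PySem.List.pyRange 0 (N:Int) 1, 0 ≤ v ∧ v < (N:Int) := by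
      intro v hv
      exact (PySem.List.mem_pyRange_one).mp hv
    simp only [pvLoopB]
    split
    · rename_i hfl
      obtain ⟨C, L⟩ := pvSweep_true_cnt N inbF hil _ p hrng hl hfl
      obtain ⟨_, S, _, _⟩ := pvSweep_props N pairs hp inbF hil hinb _ p false hrng hl hs
      exact ih _ L S (by omega)
    · rename_i hfl
      have hfl' : ((PySem.List.pyRange 0 (N:Int) 1).foldl (pvSweep inbF) (p, false)).2 = false := by
        revert hfl
        cases ((PySem.List.pyRange 0 (N:Int) 1).foldl (pvSweep inbF) (p, false)).2
        · intro _; rfl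
        · intro hcon; exact absurd rfl hcon
      obtain ⟨hst, hfail⟩ := pvSweep_false N inbF _ p hfl'
      rw [hst]
      refine ⟨hl, hs, ?_⟩
      intro v hv hPeel
      induction hPeel with
      | step w hw ihw =>
      by_cases hw' : p.getD w false = true
      · exact hw'
      · exfalso
        have hwf : p.getD w false = false := by
          cases hq : p.getD w false
          · rfl
          · exact absurd hq hw'
        have hwrng : (w:Int) ∈ PySem.List.pyRange 0 (N:Int) 1 := by
          rw [PySem.List.mem_pyRange_one]
          exact ⟨Int.natCast_nonneg w, by exact_mod_cast hv⟩
        have hg := hfail (w:Int) hwrng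
        have hb1 : -(N:Int) ≤ (w:Int) := by omega
        have hb2 : (w:Int) < N := by exact_mod_cast hv
        rw [pvGetD_eq p (w:Int) false N hl hb1 hb2, pvCIdx_natCast, hwf,
          pvGetD_eq inbF (w:Int) [] N hil hb1 hb2, pvCIdx_natCast,
          hinb _ hv] at hg
        have hex : ∃ a ∈ pvInRaw N pairs w, PySem.List.pyGetD p a false = false := by
          by_contra hno
          push_neg at hno
          refine hg ⟨rfl, ?_⟩
          rw [List.all_eq_true]
          intro a ha
          cases hq : PySem.List.pyGetD p a false
          · exact absurd hq (by simpa using hno a ha)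
          · rfl
        obtain ⟨a, ha, haf⟩ := hex
        obtain ⟨pr, hpr, hpr1, hpr2⟩ := (pvMem_inRaw_iff N pairs a w).mp ha
        obtain ⟨hc1, hc2, _, _⟩ := hp pr hpr
        have hE : (pvCIdx N pr.1, w) ∈ pvE N pairs :=
          (pvMem_E_iff N pairs _ w).mpr ⟨pr, hpr, rfl, hpr2⟩
        have htrue := ihw _ hE (pvCIdx_lt N pr.1 hc1 hc2)
        rw [hpr1] at hc1 hc2
        rw [pvGetD_eq p a false N hl hc1 hc2] at haf
        rw [← hpr1] at haf
        rw [htrue] at haf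
        simp at haf

-- ---------- final phases ----------

lemma pvMark_eq (N : Nat) (destF : List Int) (peeledF : List Bool)
    (hd : destF.length = N) (hpl : peeledF.length = N)
    (hiff : ∀ v < N, (destF.getD v 0 = 0 ↔ peeledF.getD v false = true)) :
    ∀ (st : List Int × List Bool),
    (PySem.List.pyRange 0 (N:Int) 1).foldl (pvMarkA destF) st
      = (PySem.List.pyRange 0 (N:Int) 1).foldl (pvMarkB peeledF) st := by
  intro st
  apply PySem.List.foldl_congr_mem
  intro acc x hx
  have hxr := (PySem.List.mem_pyRange_one).mp hx
  have hb1 : -(N:Int) ≤ x := by omega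
  have hlt := pvCIdx_lt N x hb1 hxr.2
  have hA := pvGetD_eq destF x 0 N hd hb1 hxr.2
  have hB := pvGetD_eq peeledF x false N hpl hb1 hxr.2
  have hiff' := hiff _ hlt
  simp only [pvMarkA, pvMarkB, hA, hB]
  by_cases h : destF.getD (pvCIdx N x) 0 = 0
  · rw [if_neg (not_not_intro h), if_neg (by rw [hiff'.mp h]; simp)]
  · have hpf : peeledF.getD (pvCIdx N x) false = false := by
      cases hq : peeledF.getD (pvCIdx N x) false
      · rfl
      · exact absurd (hiff'.mpr hq) h
    rw [if_pos h, if_pos hpf]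

lemma pvLen_mark (N : Nat) (peeledF : List Bool) :
    ∀ (rng : List Int) (st : List Int × List Bool),
    (rng.foldl (pvMarkB peeledF) st).1.length = st.1.length ∧
    (rng.foldl (pvMarkB peeledF) st).2.length = st.2.length := by
  intro rng
  induction rng with
  | nil => intro st; exact ⟨rfl, rfl⟩
  | cons v vs ih =>
    intro st
    have h1 : (pvMarkB peeledF st v).1.length = st.1.length := by
      simp only [pvMarkB]
      split
      · simp [pvRoot, pvLen_rootGo]
      · rfl
    have h2 : (pvMarkB peeledF st v).2.length = st.2.length := by
      simp only [pvMarkB]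
      split
      · simp [PySem.List.length_pySetD, pvRoot, pvLen_rootGo]
      · rfl
    simp only [List.foldl_cons]
    exact ⟨(ih _).1.trans h1, (ih _).2.trans h2⟩

lemma pvCount_eq (N : Nat) (c : List Int) (f : List Bool)
    (hc : c.length = N) (hf : f.length = N) :
    ((PySem.List.pyRange 0 (N:Int) 1).zip (c.zip f)).foldl
        (fun acc t => acc + (if t.2.2 = true ∧ t.1 = t.2.1 then 1 else 0)) (0:Int)
      = (PySem.List.pyRange 0 (N:Int) 1).foldl
        (fun acc v => if v = PySem.List.pyGetD c v 0 ∧ PySem.List.pyGetD f v true = true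
          then acc + 1 else acc) (0:Int) := by
  have hzip : (PySem.List.pyRange 0 (N:Int) 1).zip (c.zip f)
      = (List.range N).map (fun (k : Nat) => ((k:Int), (c.getD k 0, f.getD k true))) := by
    apply List.ext_getElem
    · simp [PySem.List.length_pyRange_one, hc, hf]
    · intro i h1 h2
      have hi : i < N := by
        simpa [PySem.List.length_pyRange_one, hc, hf] using h1
      simp [List.getElem_zip, PySem.List.getElem_pyRange_one, List.getElem_map,
        List.getElem_range, List.getD_eq_getElem?_getD, List.getElem?_eq_getElem,
        hc, hf, hi]
  rw [hzip, PySem.List.pyRange_zero_natCast, List.foldl_map, List.foldl_map]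
  apply PySem.List.foldl_congr_mem
  intro acc k hk
  have hkN : k < N := List.mem_range.mp hk
  simp only [PySem.List.pyGetD_natCast]
  by_cases h1 : f.getD k true = true
  · by_cases h2 : (k:Int) = c.getD k 0
    · rw [if_pos ⟨h1, h2⟩, if_pos ⟨h2, h1⟩]
    · rw [if_neg (fun hcon => h2 hcon.2), if_neg (fun hcon => h2 hcon.1)]
      omega
  · rw [if_neg (fun hcon => h1 hcon.1), if_neg (fun hcon => h1 hcon.2)]
    omega


-- ===== VERDICT (by name: the statement is the Claim_ definition above) =====
lemma pvMainEq (N : Nat) (pairs : List (Int × Int)) (hp : ∀ p ∈ pairs, pvInB N p) :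
    ((PySem.List.pyRange 0 (N:Int) 1).zip (((PySem.List.pyRange 0 (N:Int) 1).foldl (pvMarkA (pvPeelA (pairs.foldl pvBuildA (PySem.List.pyRange 0 (N:Int) 1, List.replicate N (0:Int), (PySem.List.pyRange 0 (N:Int) 1).map (fun _ => ([] : List Int)))).2.2 ((pairs.foldl pvBuildA (PySem.List.pyRange 0 (N:Int) 1, List.replicate N (0:Int), (PySem.List.pyRange 0 (N:Int) 1).map (fun _ => ([] : List Int)))).2.1.length + ((PySem.List.pyRange 0 (N:Int) 1).filter (fun a => PySem.List.pyGetD (pairs.foldl pvBuildA (PySem.List.pyRange 0 (N:Int) 1, List.replicate N (0:Int), (PySem.List.pyRange 0 (N:Int) 1).map (fun _ => ([] : List Int)))).2.1 a 0 = 0)).length + 1) 0 ((PySem.List.pyRange 0 (N:Int) 1).filter (fun a => PySem.List.pyGetD (pairs.foldl pvBuildA (PySem.List.pyRange 0 (N:Int) 1, List.replicate N (0:Int), (PySem.List.pyRange 0 (N:Int) 1).map (fun _ => ([] : List Int)))).2.1 a 0 = 0)) (pairs.foldl pvBuildA (PySem.List.pyRange 0 (N:Int) 1, List.replicate N (0:Int),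 (PySem.List.pyRange 0 (N:Int) 1).map (fun _ => ([] : List Int)))).2.1)) ((pairs.foldl pvBuildA (PySem.List.pyRange 0 (N:Int) 1, List.replicate N (0:Int), (PySem.List.pyRange 0 (N:Int) 1).map (fun _ => ([] : List Int)))).1, List.replicate N true)).1.zip ((PySem.List.pyRange 0 (N:Int) 1).foldl (pvMarkA (pvPeelA (pairs.foldl pvBuildA (PySem.List.pyRange 0 (N:Int) 1, List.replicate N (0:Int), (PySem.List.pyRange 0 (N:Int) 1).map (fun _ => ([] : List Int)))).2.2 ((pairs.foldl pvBuildA (PySem.List.pyRange 0 (N:Int) 1, List.replicate N (0:Int), (PySem.List.pyRange 0 (N:Int) 1).map (fun _ => ([] : List Int)))).2.1.length + ((PySem.List.pyRange 0 (N:Int) 1).filter (fun a => PySem.List.pyGetD (pairs.foldl pvBuildA (PySem.List.pyRange 0 (N:Int) 1, List.replicate N (0:Int), (PySem.List.pyRange 0 (N:Int) 1).map (fun _ => ([] : List Int)))).2.1 a 0 = 0)).length + 1) 0 ((PySem.List.pyRange 0 (N:Int) 1).filter (fun a => PySem.List.pyGetD (pairs.foldl pvBuildA (PySem.List.pyRange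 0 (N:Int) 1, List.replicate N (0:Int), (PySem.List.pyRange 0 (N:Int) 1).map (fun _ => ([] : List Int)))).2.1 a 0 = 0)) (pairs.foldl pvBuildA (PySem.List.pyRange 0 (N:Int) 1, List.replicate N (0:Int), (PySem.List.pyRange 0 (N:Int) 1).map (fun _ => ([] : List Int)))).2.1)) ((pairs.foldl pvBuildA (PySem.List.pyRange 0 (N:Int) 1, List.replicate N (0:Int), (PySem.List.pyRange 0 (N:Int) 1).map (fun _ => ([] : List Int)))).1, List.replicate N true)).2)).foldl (fun acc t => acc + (if t.2.2 = true ∧ t.1 = t.2.1 then 1 else 0)) (0:Int)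
    = (PySem.List.pyRange 0 (N:Int) 1).foldl (fun acc v => if v = PySem.List.pyGetD ((PySem.List.pyRange 0 (N:Int) 1).foldl (pvMarkB (pvLoopB (pairs.foldl pvBuildB (PySem.List.pyRange 0 (N:Int) 1, (PySem.List.pyRange 0 (N:Int) 1).map (fun _ => ([] : List Int)))).2 (PySem.List.pyRange 0 (N:Int) 1) ((pairs.foldl pvBuildB (PySem.List.pyRange 0 (N:Int) 1, (PySem.List.pyRange 0 (N:Int) 1).map (fun _ => ([] : List Int)))).2.length + 2) (List.replicate N false))) ((pairs.foldl pvBuildB (PySem.List.pyRange 0 (N:Int) 1, (PySem.List.pyRange 0 (N:Int) 1).map (fun _ => ([] : List Int)))).1, List.replicate N true)).1 v 0 ∧ PySem.List.pyGetD ((PySem.List.pyRange 0 (N:Int) 1).foldl (pvMarkB (pvLoopB (pairs.foldl pvBuildB (PySem.List.pyRange 0 (N:Int) 1, (PySem.List.pyRange 0 (N:Int) 1).map (fun _ => ([] : List Int)))).2 (PySem.List.pyRange 0 (N:Int) 1) ((pairs.foldl pvBuildB (PySem.List.pyRange 0 (N:Int) 1, (PySem.List.pyRange 0 (N:Int) 1).map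 (fun _ => ([] : List Int)))).2.length + 2) (List.replicate N false))) ((pairs.foldl pvBuildB (PySem.List.pyRange 0 (N:Int) 1, (PySem.List.pyRange 0 (N:Int) 1).map (fun _ => ([] : List Int)))).1, List.replicate N true)).2 v true = true then acc + 1 else acc) (0:Int) := by
  set stA := pairs.foldl pvBuildA (PySem.List.pyRange 0 (N:Int) 1, List.replicate N (0:Int), (PySem.List.pyRange 0 (N:Int) 1).map (fun _ => ([] : List Int))) with hstA
  set pool0 := (PySem.List.pyRange 0 (N:Int) 1).filter (fun a => PySem.List.pyGetD stA.2.1 a 0 = 0) with hpool0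
  set destF := pvPeelA stA.2.2 (stA.2.1.length + pool0.length + 1) 0 pool0 stA.2.1 with hdestF
  set stB := pairs.foldl pvBuildB (PySem.List.pyRange 0 (N:Int) 1, (PySem.List.pyRange 0 (N:Int) 1).map (fun _ => ([] : List Int))) with hstB
  set peeledF := pvLoopB stB.2 (PySem.List.pyRange 0 (N:Int) 1) (stB.2.length + 2) (List.replicate N false) with hpeeledF
  -- initial arrays
  have hc0len : (PySem.List.pyRange 0 (N:Int) 1).length = N := by
    simp [PySem.List.length_pyRange_one]
  have hd0 : ∀ v < N, (List.replicate N (0:Int)).getD v 0 = 0 :=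
    fun v hv => List.getD_replicate _ hv
  have hab0len : ((PySem.List.pyRange 0 (N:Int) 1).map (fun _ => ([]:List Int))).length = N := by
    simp [hc0len]
  have hab0 : ∀ v < N, ((PySem.List.pyRange 0 (N:Int) 1).map (fun _ => ([]:List Int))).getD v [] = [] := by
    intro v hv
    have hvl : v < ((PySem.List.pyRange 0 (N:Int) 1).map (fun _ => ([]:List Int))).length := by omega
    simp [List.getD, List.getElem?_eq_getElem hvl]
  -- A-side build
  obtain ⟨hdBlen, habFlen, hdBval, habFval⟩ :=
    pvBuildA_char N pairs (PySem.List.pyRange 0 (N:Int) 1) (List.replicate N (0:Int))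
      ((PySem.List.pyRange 0 (N:Int) 1).map (fun _ => ([]:List Int))) hp (by simp) hab0len
  rw [← hstA] at hdBlen habFlen hdBval habFval
  have hdBval' : ∀ v < N, stA.2.1.getD v 0 = (pvIndeg (pvE N pairs) v : Int) := by
    intro v hv
    rw [hdBval v hv, hd0 v hv]
    omega
  have habFval' : ∀ v < N, stA.2.2.getD v [] = pvOutRaw N pairs v := by
    intro v hv
    rw [habFval v hv, hab0 v hv]
    rfl
  have hpb : ∀ x ∈ pool0, -(N:Int) ≤ x ∧ x < N := by
    intro x hx
    have := (PySem.List.mem_pyRange_one).mp (List.mem_filter.mp hx).1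
    omega
  have hndp : (pool0.map (pvCIdx N)).Nodup := by
    rw [hpool0]
    refine List.Nodup.map_on ?_ (List.Nodup.filter _ (PySem.List.nodup_pyRange_one 0 (N:Int)))
    intro x hx y hy he
    have hx0' := (PySem.List.mem_pyRange_one).mp (List.mem_filter.mp hx).1
    have hy0' := (PySem.List.mem_pyRange_one).mp (List.mem_filter.mp hy).1
    simp only [pvCIdx, if_pos hx0'.1, if_pos hy0'.1] at he
    omega
  have hmempool : ∀ v < N, (v ∈ pool0.map (pvCIdx N) ↔ pvIndeg (pvE N pairs) v = 0) := by
    intro v hv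
    constructor
    · intro hvm
      obtain ⟨x, hx, rfl⟩ := List.mem_map.mp hvm
      obtain ⟨hx1, hx2⟩ := List.mem_filter.mp hx
      have hxr := (PySem.List.mem_pyRange_one).mp hx1
      have hcond : PySem.List.pyGetD stA.2.1 x 0 = 0 := by simpa using hx2
      rw [pvGetD_eq stA.2.1 x 0 N hdBlen (by omega) hxr.2] at hcond
      have hlt := pvCIdx_lt N x (by omega) hxr.2
      have := hdBval' (pvCIdx N x) hlt
      omega
    · intro h0i
      have hvd : stA.2.1.getD v 0 = 0 := by
        rw [hdBval' v hv, h0i]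
        rfl
      refine List.mem_map.mpr ⟨(v:Int), ?_, pvCIdx_natCast N v⟩
      refine List.mem_filter.mpr ⟨?_, ?_⟩
      · rw [PySem.List.mem_pyRange_one]
        exact ⟨by omega, by exact_mod_cast hv⟩
      · have hq := pvGetD_eq stA.2.1 (v:Int) 0 N hdBlen (by omega) (by exact_mod_cast hv)
        rw [pvCIdx_natCast] at hq
        simp only [hq, decide_eq_true_eq]
        exact hvd
  -- A-side peel
  obtain ⟨P, hdFlen, hEval, hfix, hsup⟩ :=
    pvPeelA_main N pairs hp stA.2.2 habFlen habFval'
      (stA.2.1.length + pool0.length + 1) 0 pool0 stA.2.1 hdBlen hpb hndp (by omega)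
      (by
        intro v hv
        rw [List.take_zero, List.map_nil, pvInFrom_nil, hdBval' v hv]
        omega)
      (by
        intro v hv
        rw [List.take_zero, List.map_nil, pvInFrom_nil, hmempool v hv]
        omega)
      (by simp)
      (by omega)
  rw [← hdestF] at hdFlen hEval
  have hAiff : ∀ v < N, (destF.getD v 0 = 0 ↔ pvPeelable (pvE N pairs) v) := by
    intro v hv
    have h1 := hEval v hv
    have h2 := hfix v hv
    have h3 := pvPeelA_iff N pairs hp P hfix hsup v hv
    have h4 := pvInFrom_le (pvE N pairs) P v
    constructor
    · intro hz
      apply h3.mp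
      apply h2.mpr
      omega
    · intro hPe
      have := h2.mp (h3.mpr hPe)
      omega
  -- B-side build
  obtain ⟨hinblen, hinbval⟩ :=
    pvBuildB_char N pairs (PySem.List.pyRange 0 (N:Int) 1)
      ((PySem.List.pyRange 0 (N:Int) 1).map (fun _ => ([]:List Int))) hp hab0len
  rw [← hstB] at hinblen hinbval
  have hinbval' : ∀ v < N, stB.2.getD v [] = pvInRaw N pairs v := by
    intro v hv
    rw [hinbval v hv, hab0 v hv]
    rfl
  -- B-side sweep loop
  obtain ⟨hpLlen, hSound, hComplete⟩ :=
    pvLoopB_main N pairs hp stB.2 hinblen hinbval' (stB.2.length + 2)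
      (List.replicate N false) (by simp)
      (by
        intro v hv ht
        rw [List.getD_replicate _ hv] at ht
        simp at ht)
      (by omega)
  rw [← hpeeledF] at hpLlen hSound hComplete
  have hiff : ∀ v < N, (destF.getD v 0 = 0 ↔ peeledF.getD v false = true) := by
    intro v hv
    constructor
    · intro hz
      exact hComplete v hv ((hAiff v hv).mp hz)
    · intro ht
      exact (hAiff v hv).mpr (hSound v hv ht)
  -- equal clusters after the build
  have hcl : stA.1 = stB.1 := by
    rw [hstA, hstB, pvBuildA_fst, pvBuildB_fst]
  have hcllen : stB.1.length = N := by
    rw [hstB, pvBuildB_fst, pvLen_foldCluster, hc0len]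
  -- the marking folds coincide
  have hmkeq : (PySem.List.pyRange 0 (N:Int) 1).foldl (pvMarkA destF) (stA.1, List.replicate N true)
      = (PySem.List.pyRange 0 (N:Int) 1).foldl (pvMarkB peeledF) (stB.1, List.replicate N true) := by
    rw [hcl]
    exact pvMark_eq N destF peeledF hdFlen hpLlen hiff _
  rw [hmkeq]
  -- counts agree
  have hmlen := pvLen_mark N peeledF (PySem.List.pyRange 0 (N:Int) 1) (stB.1, List.replicate N true)
  rw [pvCount_eq N _ _ (hmlen.1.trans hcllen) (hmlen.2.trans (by simp))]

theorem minimum_teleportation_pipes_spec : Claim_equal_minimum_teleportation_pipes := by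
  intro n m pairs hdom hpre
  unfold Spec_minimum_teleportation_pipes
  by_cases hn : 0 ≤ n + 1
  case neg =>
    cases pairs with
    | cons p ps =>
      exfalso
      have := hpre p (List.mem_cons_self ..)
      omega
    | nil =>
      have h0 : (n + 1).toNat = 0 := by omega
      have hnil : PySem.List.pyRange 0 (n + 1) 1 = [] :=
        PySem.List.pyRange_one_eq_nil (by omega)
      simp [minimum_teleportation_pipes, minimum_teleportation_pipes_alt, h0, hnil,
        pvPeelA, pvLoopB]
  case pos =>
    have hN1 : n + 1 = (((n + 1).toNat : Nat) : Int) := (Int.toNat_of_nonneg hn).symm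
    have hp : ∀ p ∈ pairs, pvInB (n + 1).toNat p := by
      intro p hpm
      have h1 := hpre p hpm
      have h2 : ((((n + 1).toNat : Nat)) : Int) = n + 1 := Int.toNat_of_nonneg hn
      exact ⟨by omega, by omega, by omega, by omega⟩
    simp only [minimum_teleportation_pipes, minimum_teleportation_pipes_alt]
    rw [hN1]
    exact congrArg (fun z => ((((n + 1).toNat : Nat)) : Int) - z)
      (pvMainEq (n + 1).toNat pairs hp)
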